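-- pv_equiv track=rewrite | github.com/rec3141/danaSeq | nanopore_live/nextflow/bin/tetramer_freqs.py | mask_ambiguous
-- ===== SOURCE A (Python) =====
-- def mask_ambiguous(seq, min_region=50):
--     """Replace short regions between ambiguous bases with N (skip in counting)."""
--     seq = list(seq.upper())
--     ambig_positions = [0]
--     for i in range(1, len(seq)):
--         if seq[i] not in "ACGT":
--             ambig_positions.append(i)
--     ambig_positions.append(len(seq))
--
--     for i in range(1, len(ambig_positions)):
--         length = ambig_positions[i] - ambig_positions[i - 1] + 1
--         if length < min_region:
--             for j in range(ambig_positions[i - 1], ambig_positions[i]):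
--                 seq[j] = "N"
--     return "".join(seq)
-- ===== SOURCE B (Python) =====
-- def mask_ambiguous(seq, min_region=50):
--     """Replace short regions between ambiguous bases with N (skip in counting)."""
--     s = seq.upper()
--     n = len(s)
--     pieces = []
--     start = 0
--     for i in range(1, n):
--         if s[i] not in "ACGT":
--             pieces.append("N" * (i - start) if i - start + 1 < min_region else s[start:i])
--             start = i
--     pieces.append("N" * (n - start) if n - start + 1 < min_region else s[start:n])
--     return "".join(pieces)
-- ===== Notes on version B (the rewrite author's own statement) =====
-- stated objective: alternative
-- what changed: A first builds the full list of ambiguous positions and then mutates a char list in place, masking short regions in a second indexed pass with a nested write loop; B is a single streaming pass that closes each region as it meets an ambiguous base and emits either an 'N'-run or the original slice, joining the pieces at the end.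
import Mathlib
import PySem

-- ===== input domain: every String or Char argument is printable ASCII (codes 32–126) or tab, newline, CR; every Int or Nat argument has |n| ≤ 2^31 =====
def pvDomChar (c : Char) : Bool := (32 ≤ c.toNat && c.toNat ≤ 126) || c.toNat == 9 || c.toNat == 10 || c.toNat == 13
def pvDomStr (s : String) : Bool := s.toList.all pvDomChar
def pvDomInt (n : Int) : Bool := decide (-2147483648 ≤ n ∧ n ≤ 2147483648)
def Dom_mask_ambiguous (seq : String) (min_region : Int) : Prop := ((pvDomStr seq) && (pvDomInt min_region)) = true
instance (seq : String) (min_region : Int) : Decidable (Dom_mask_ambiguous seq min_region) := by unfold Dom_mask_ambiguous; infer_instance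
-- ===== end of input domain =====

-- B replaces A's two-phase plan (collect all ambiguous positions, then mask short regions
-- in place) by a single streaming pass that emits each region as it is closed; same return value.

-- ===== PORT A =====
def mask_ambiguous (seq : String) (min_region : Int) : String :=
  let s := PySem.Chars.upper seq.toList
  let n := PySem.List.len s
  let ambig := (PySem.List.pyRange 1 n 1).foldl
      (fun acc i =>
        if !(PySem.Chars.isIn [PySem.List.pyGetD s i 'N'] ("ACGT".toList)) then acc ++ [i] else acc)
      [(0 : Int)]
  let positions := ambig ++ [n]
  let s2 := (PySem.List.pyRange 1 (PySem.List.len positions) 1).foldl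
      (fun sq i =>
        let length := PySem.List.pyGetD positions i 0 - PySem.List.pyGetD positions (i - 1) 0 + 1
        if length < min_region then
          (PySem.List.pyRange (PySem.List.pyGetD positions (i - 1) 0) (PySem.List.pyGetD positions i 0) 1).foldl
            (fun sq j => PySem.List.pySetD sq j 'N') sq
        else sq)
      s
  String.ofList s2

-- ===== PORT B =====
def mask_ambiguous_alt (seq : String) (min_region : Int) : String :=
  let s := PySem.Chars.upper seq.toList
  let n := PySem.List.len s
  let st := (PySem.List.pyRange 1 n 1).foldl
      (fun (acc : List (List Char) × Int) i =>
        if !(PySem.Chars.isIn [PySem.List.pyGetD s i 'N'] ("ACGT".toList)) then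
          (acc.1 ++ [if i - acc.2 + 1 < min_region then List.replicate (i - acc.2).toNat 'N'
                     else PySem.List.slice s (some acc.2) (some i)], i)
        else acc)
      (([] : List (List Char)), (0 : Int))
  let last := if n - st.2 + 1 < min_region then List.replicate (n - st.2).toNat 'N'
              else PySem.List.slice s (some st.2) (some n)
  String.ofList (st.1 ++ [last]).flatten

-- ===== PRECONDITION & SPEC =====
def Spec_mask_ambiguous (seq : String) (min_region : Int) (out : String) : Prop := out = mask_ambiguous_alt seq min_region
instance (seq : String) (min_region : Int) (out : String) : Decidable (Spec_mask_ambiguous seq min_region out) := by unfold Spec_mask_ambiguous; infer_instance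

-- ===== CLAIM (what is proved, stated in full; the proofs are below) =====
def Claim_equal_mask_ambiguous : Prop := ∀ (seq : String) (min_region : Int), Dom_mask_ambiguous seq min_region → Spec_mask_ambiguous seq min_region (mask_ambiguous seq min_region)

-- ===== LEMMAS AND PROOFS =====

-- the ambiguity test both loops share
def pvAmb (s : List Char) (i : Int) : Bool :=
  !(PySem.Chars.isIn [PySem.List.pyGetD s i 'N'] ("ACGT".toList))

-- monotone cut list starting at prev (the invariant both sides share)
def pvMono : Int → List Int → Prop
  | _, [] => True
  | prev, c :: cs => prev ≤ c ∧ pvMono c cs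

-- the piece B emits for region [a,b)
def pvPiece (m : Int) (s : List Char) (a b : Int) : List Char :=
  if b - a + 1 < m then List.replicate (b - a).toNat 'N' else PySem.List.slice s (some a) (some b)

def pvPieces (m : Int) (s : List Char) : Int → List Int → List (List Char)
  | _, [] => []
  | prev, c :: cs => pvPiece m s prev c :: pvPieces m s c cs

def pvLast : Int → List Int → Int
  | prev, [] => prev
  | _, c :: cs => pvLast c cs

def pvPairFold {β : Type} (g : β → Int → Int → β) : β → Int → List Int → β
  | acc, _, [] => acc
  | acc, x, y :: ys => pvPairFold g (g acc x y) y ys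

-- A's inner masking loop
def pvFill (sq : List Char) (a b : Int) : List Char :=
  (PySem.List.pyRange a b 1).foldl (fun sq j => PySem.List.pySetD sq j 'N') sq

def pvMaskStep (m : Int) (sq : List Char) (a b : Int) : List Char :=
  if b - a + 1 < m then pvFill sq a b else sq

-- the uppercased sequence and the list of ambiguous positions in [1, len)
def pvS (seq : String) : List Char := PySem.Chars.upper seq.toList
def pvP (s : List Char) : List Int := (PySem.List.pyRange 1 (s.length : Int) 1).filter (pvAmb s)

lemma pvTake_app (X Y : List Char) (n : Nat) (h : X.length = n) : (X ++ Y).take n = X := by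
  subst h; exact List.take_left

lemma pvDrop_app (X Y : List Char) (n : Nat) (h : X.length = n) : (X ++ Y).drop n = Y := by
  subst h; exact List.drop_left

lemma pvDrop_eq_of_le (u v : List Char) (c d : Nat) (h : u.drop c = v.drop c) (hcd : c ≤ d) :
    u.drop d = v.drop d := by
  have h2 := congrArg (List.drop (d - c)) h
  rw [List.drop_drop, List.drop_drop] at h2
  have hd : c + (d - c) = d := by omega
  rwa [hd] at h2

lemma pvDrop_drop_idx (l : List Char) (p q r : Nat) (h : p + q = r) :
    (l.drop p).drop q = l.drop r := by
  subst h
  rw [List.drop_drop]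

lemma pvDrop_app_add (X Y : List Char) (n k : Nat) (h : X.length = n) :
    (X ++ Y).drop (n + k) = Y.drop k := by
  subst h
  rw [← pvDrop_drop_idx (X ++ Y) X.length k (X.length + k) rfl, pvDrop_app X Y X.length rfl]

lemma pvLast_append (prev x : Int) (cs : List Int) : pvLast prev (cs ++ [x]) = x := by
  induction cs generalizing prev with
  | nil => rfl
  | cons c cs ih => simpa [pvLast] using ih c

lemma pvPieces_append (m : Int) (s : List Char) (prev x : Int) (cs : List Int) :
    pvPieces m s prev (cs ++ [x]) = pvPieces m s prev cs ++ [pvPiece m s (pvLast prev cs) x] := by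
  induction cs generalizing prev with
  | nil => rfl
  | cons c cs ih => simp [pvPieces, pvLast, ih c]

lemma pvLe_pvLast (prev : Int) (cs : List Int) (h : pvMono prev cs) : prev ≤ pvLast prev cs := by
  induction cs generalizing prev with
  | nil => simp [pvLast]
  | cons c cs ih => exact le_trans h.1 (by simpa [pvLast] using ih c h.2)

lemma pvMono_of_pairwise : ∀ (l : List Int) (prev : Int),
    List.Pairwise (· ≤ ·) (prev :: l) → pvMono prev l := by
  intro l
  induction l with
  | nil => intro prev _; trivial
  | cons c cs ih =>
    intro prev h
    rw [List.pairwise_cons] at h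
    exact ⟨h.1 c (by simp), ih c h.2⟩

-- index-pair fold over the positions list = structural pair fold
lemma pvFoldRange_pairs {β : Type} (g : β → Int → Int → β) :
    ∀ (xs : List Int) (x : Int) (acc : β),
      (List.range xs.length).foldl
        (fun acc k => g acc ((x :: xs).getD k 0) (xs.getD k 0)) acc
      = pvPairFold g acc x xs := by
  intro xs
  induction xs with
  | nil => intro x acc; rfl
  | cons y ys ih =>
    intro x acc
    simp only [List.length_cons, List.range_succ_eq_map, List.foldl_cons, List.foldl_map]
    simpa [pvPairFold, List.getD] using ih y (g acc x y)

lemma pvIndexFold_pairs {β : Type} (g : β → Int → Int → β) (x : Int) (xs : List Int) (acc : β) :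
    (PySem.List.pyRange 1 (PySem.List.len (x :: xs)) 1).foldl
      (fun acc i => g acc (PySem.List.pyGetD (x :: xs) (i - 1) 0) (PySem.List.pyGetD (x :: xs) i 0)) acc
    = pvPairFold g acc x xs := by
  have hlen : PySem.List.len (x :: xs) = ((xs.length : Int) + 1) := by
    simp [PySem.List.len_eq]
  rw [hlen, PySem.List.pyRange_one, List.foldl_map]
  have h1 : ((xs.length : Int) + 1 - 1).toNat = xs.length := by omega
  rw [h1]
  have hb : (fun (acc : β) (k : Nat) =>
        g acc (PySem.List.pyGetD (x :: xs) (1 + (k : Int) - 1) 0) (PySem.List.pyGetD (x :: xs) (1 + (k : Int)) 0))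
      = (fun (acc : β) (k : Nat) => g acc ((x :: xs).getD k 0) (xs.getD k 0)) := by
    funext acc k
    have e1 : (1 + (k : Int) - 1) = ((k : Nat) : Int) := by omega
    have e2 : (1 + (k : Int)) = (((k + 1 : Nat)) : Int) := by push_cast; omega
    rw [e1, e2, PySem.List.pyGetD_natCast, PySem.List.pyGetD_natCast]
    simp [List.getD]
  rw [hb]
  exact pvFoldRange_pairs g xs x acc

-- A's inner loop writes replicate 'N' over [a, a+k)
lemma pvFill_eq (k : Nat) : ∀ (sq : List Char) (a : Int), 0 ≤ a → a.toNat + k ≤ sq.length →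
    pvFill sq a (a + k) = sq.take a.toNat ++ List.replicate k 'N' ++ sq.drop (a.toNat + k) := by
  induction k with
  | zero =>
    intro sq a ha _
    rw [pvFill, PySem.List.pyRange_one_eq_nil (by omega)]
    simp
  | succ k ih =>
    intro sq a ha hlen
    have hlt : a < a + ((k + 1 : Nat) : Int) := by push_cast; omega
    rw [pvFill, PySem.List.pyRange_one_cons hlt]
    simp only [List.foldl_cons]
    have he : a + ((k + 1 : Nat) : Int) = (a + 1) + (k : Int) := by push_cast; ring
    have hset : PySem.List.pySetD sq a 'N' = sq.set a.toNat 'N' := by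
      simp [PySem.List.pySetD_of_nonneg, ha]
    rw [hset]
    have step : (PySem.List.pyRange (a + 1) ((a + 1) + (k : Int)) 1).foldl
        (fun sq j => PySem.List.pySetD sq j 'N') (sq.set a.toNat 'N')
        = pvFill (sq.set a.toNat 'N') (a + 1) ((a + 1) + (k : Int)) := rfl
    rw [he, step, ih (sq.set a.toNat 'N') (a + 1) (by omega) (by simp; omega)]
    have hia : a.toNat < sq.length := by omega
    have h1 : (a + 1).toNat = a.toNat + 1 := by omega
    rw [h1, List.set_eq_take_cons_drop 'N' hia]
    have hX : (sq.take a.toNat).length = a.toNat := by simp; omega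
    have hXN : (sq.take a.toNat ++ ['N']).length = a.toNat + 1 := by simp; omega
    have hc : sq.take a.toNat ++ 'N' :: sq.drop (a.toNat + 1)
        = (sq.take a.toNat ++ ['N']) ++ sq.drop (a.toNat + 1) := by simp
    rw [hc, pvTake_app _ _ _ hXN, pvDrop_app_add _ _ _ k hXN,
      pvDrop_drop_idx sq (a.toNat + 1) k (a.toNat + (k + 1)) (by omega)]
    simp [List.replicate_succ, List.append_assoc]

lemma pvPieces_congr (m : Int) : ∀ (cs : List Int) (sq sq' : List Char) (c : Int), 0 ≤ c →
    sq'.drop c.toNat = sq.drop c.toNat → pvMono c cs →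
    pvPieces m sq' c cs = pvPieces m sq c cs := by
  intro cs
  induction cs with
  | nil => intro _ _ _ _ _ _; rfl
  | cons a cs ih =>
    intro sq sq' c hc hdrop hm
    have hca : c ≤ a := hm.1
    have hpiece : pvPiece m sq' c a = pvPiece m sq c a := by
      unfold pvPiece
      split_ifs with h
      · rfl
      · rw [PySem.List.slice_toNat sq' hc (by omega), PySem.List.slice_toNat sq hc (by omega), hdrop]
    have hdrop' : sq'.drop a.toNat = sq.drop a.toNat :=
      pvDrop_eq_of_le sq' sq c.toNat a.toNat hdrop (by omega)
    simp [pvPieces, hpiece, ih sq sq' a (by omega) hdrop' hm.2]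

-- the central A-side lemma: in-place masking of consecutive regions = concatenation of pieces
lemma pvMask_eq (m : Int) : ∀ (cs : List Int) (sq : List Char) (prev : Int), 0 ≤ prev →
    pvMono prev cs → pvLast prev cs ≤ (sq.length : Int) →
    pvPairFold (pvMaskStep m) sq prev cs
    = sq.take prev.toNat ++ (pvPieces m sq prev cs).flatten ++ sq.drop (pvLast prev cs).toNat := by
  intro cs
  induction cs with
  | nil =>
    intro sq prev _ _ _
    simp [pvPairFold, pvPieces, pvLast]
  | cons c cs ih =>
    intro sq prev hprev hm hlast
    have hpc : prev ≤ c := hm.1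
    have hclast : c ≤ pvLast c cs := pvLe_pvLast c cs hm.2
    have hlast' : pvLast prev (c :: cs) = pvLast c cs := rfl
    have hcl : c ≤ (sq.length : Int) := le_trans hclast (by rwa [hlast'] at hlast)
    have hcn : c.toNat ≤ sq.length := by omega
    have hpn : prev.toNat ≤ sq.length := by omega
    set sq' := pvMaskStep m sq prev c with hsq'
    have key : sq'.length = sq.length ∧ sq'.drop c.toNat = sq.drop c.toNat ∧
        sq'.take c.toNat = sq.take prev.toNat ++ pvPiece m sq prev c := by
      rw [hsq']
      unfold pvMaskStep pvPiece
      split_ifs with h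
      · set k := (c - prev).toNat with hk
        have hck : c = prev + (k : Int) := by omega
        have hpk : prev.toNat + k = c.toNat := by omega
        have hfill0 := pvFill_eq k sq prev hprev (by omega)
        rw [hpk] at hfill0
        have hfill : pvFill sq prev c
            = sq.take prev.toNat ++ List.replicate k 'N' ++ sq.drop c.toNat := by
          conv_lhs => rw [hck]
          exact hfill0
        rw [hfill]
        have hX : (sq.take prev.toNat).length = prev.toNat := by simp; omega
        have hXR : (sq.take prev.toNat ++ List.replicate k 'N').length = c.toNat := by
          simp; omega
        refine ⟨by simp; omega, ?_, ?_⟩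
        · rw [pvDrop_app _ _ _ hXR]
        · rw [pvTake_app _ _ _ hXR]
      · refine ⟨rfl, rfl, ?_⟩
        have hsplit : c.toNat = prev.toNat + (c.toNat - prev.toNat) := by omega
        rw [hsplit, List.take_add, PySem.List.slice_toNat sq hprev (by omega)]
    have hfold : pvPairFold (pvMaskStep m) sq prev (c :: cs)
        = pvPairFold (pvMaskStep m) sq' c cs := rfl
    rw [hfold, ih sq' c (by omega) hm.2 (by rw [key.1]; rwa [hlast'] at hlast)]
    rw [pvPieces_congr m cs sq sq' c (by omega) key.2.1 hm.2]
    have hdl : sq'.drop (pvLast c cs).toNat = sq.drop (pvLast c cs).toNat :=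
      pvDrop_eq_of_le sq' sq c.toNat (pvLast c cs).toNat key.2.1 (by omega)
    rw [key.2.2, hdl, hlast']
    simp [pvPieces, List.append_assoc]

-- B's loop invariant
lemma pvBLoop (m : Int) (s : List Char) :
    ∀ (r : List Int) (pieces : List (List Char)) (start : Int),
      r.foldl (fun (acc : List (List Char) × Int) i =>
          if !(PySem.Chars.isIn [PySem.List.pyGetD s i 'N'] ("ACGT".toList)) then
            (acc.1 ++ [if i - acc.2 + 1 < m then List.replicate (i - acc.2).toNat 'N'
                       else PySem.List.slice s (some acc.2) (some i)], i)
          else acc) (pieces, start)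
      = (pieces ++ pvPieces m s start (r.filter (pvAmb s)), pvLast start (r.filter (pvAmb s))) := by
  intro r
  induction r with
  | nil => intro pieces start; simp [pvPieces, pvLast]
  | cons i r ih =>
    intro pieces start
    rw [List.foldl_cons, List.filter_cons]
    by_cases h : pvAmb s i
    · have h' : ((!(PySem.Chars.isIn [PySem.List.pyGetD s i 'N'] ("ACGT".toList))) = true) := h
      rw [if_pos h', if_pos h, ih]
      simp [pvPieces, pvLast, pvPiece, List.append_assoc]
    · have h' : ¬ ((!(PySem.Chars.isIn [PySem.List.pyGetD s i 'N'] ("ACGT".toList))) = true) := h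
      rw [if_neg h', if_neg h]
      exact ih pieces start

lemma pvMono_cuts (s : List Char) : pvMono 0 (pvP s ++ [(s.length : Int)]) := by
  apply pvMono_of_pairwise
  have h1 : ∀ x ∈ pvP s, 1 ≤ x ∧ x < (s.length : Int) := by
    intro x hx
    exact PySem.List.mem_pyRange_one.1 (List.mem_filter.1 hx).1
  have hp : (pvP s).Pairwise (· ≤ ·) :=
    ((PySem.List.pairwise_lt_pyRange_one 1 (s.length : Int)).filter _).imp (fun h => le_of_lt h)
  rw [List.pairwise_cons]
  constructor
  · intro x hx
    rcases List.mem_append.1 hx with h | h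
    · have := (h1 x h).1; omega
    · have hx' : x = (s.length : Int) := by simpa using h
      subst hx'; omega
  · rw [List.pairwise_append]
    refine ⟨hp, by simp, ?_⟩
    intro x hx y hy
    have hy' : y = (s.length : Int) := by simpa using hy
    subst hy'
    exact le_of_lt (h1 x hx).2

-- A computes the concatenation of the pieces of all regions
lemma pvA_eq (seq : String) (m : Int) :
    mask_ambiguous seq m
    = String.ofList (pvPieces m (pvS seq) 0 (pvP (pvS seq) ++ [((pvS seq).length : Int)])).flatten := by
  simp only [mask_ambiguous, PySem.List.len_eq]
  set s := PySem.Chars.upper seq.toList with hs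
  have hfold1 : (PySem.List.pyRange 1 (s.length : Int) 1).foldl
      (fun acc i => if !(PySem.Chars.isIn [PySem.List.pyGetD s i 'N'] ("ACGT".toList)) then acc ++ [i] else acc)
      [(0 : Int)]
      = 0 :: pvP s := by
    have h0 := PySem.List.foldl_append_if_eq_filter (pvAmb s) (PySem.List.pyRange 1 (s.length : Int) 1) ([(0:Int)])
    simpa [pvAmb, pvP] using h0
  rw [hfold1]
  have hcons : (0 :: pvP s) ++ [(s.length : Int)] = 0 :: (pvP s ++ [(s.length : Int)]) := by simp
  rw [hcons]
  have hA := pvIndexFold_pairs (pvMaskStep m) 0 (pvP s ++ [(s.length : Int)]) s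
  simp only [pvMaskStep, pvFill, PySem.List.len_eq] at hA
  rw [hA]
  have hmono := pvMono_cuts s
  have hlastv : pvLast 0 (pvP s ++ [(s.length : Int)]) = (s.length : Int) := pvLast_append 0 _ _
  rw [pvMask_eq m (pvP s ++ [(s.length : Int)]) s 0 le_rfl hmono (by rw [hlastv])]
  rw [hlastv]
  simp [pvS, ← hs, pvP]

-- B computes the same pieces, streamed
lemma pvB_eq (seq : String) (m : Int) :
    mask_ambiguous_alt seq m
    = String.ofList (pvPieces m (pvS seq) 0 (pvP (pvS seq))
        ++ [pvPiece m (pvS seq) (pvLast 0 (pvP (pvS seq))) ((pvS seq).length : Int)]).flatten := by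
  simp only [mask_ambiguous_alt, PySem.List.len_eq]
  set s := PySem.Chars.upper seq.toList with hs
  have hB := pvBLoop m s (PySem.List.pyRange 1 (s.length : Int) 1) [] 0
  rw [hB]
  simp [pvS, ← hs, pvP, pvPiece]

-- ===== VERDICT (by name: the statement is the Claim_ definition above) =====
theorem mask_ambiguous_spec : Claim_equal_mask_ambiguous := by
  intro seq m _
  unfold Spec_mask_ambiguous
  rw [pvA_eq, pvB_eq, pvPieces_append]
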